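-- pv_equiv track=rewrite | github.com/yiyousiow000814/XAUUSD-Calendar-Agent | app/agent/timezone.py | clamp_utc_offset_minutes
-- ===== SOURCE A (Python) =====
-- MIN_UTC_OFFSET_MINUTES = -12 * 60
--
-- MAX_UTC_OFFSET_MINUTES = 14 * 60
--
-- SUPPORTED_UTC_OFFSET_MINUTES = {
--     *(hours * 60 for hours in range(0, 15)),
--     *(hours * 60 + 30 for hours in range(1, 15)),
--     *(-hours * 60 for hours in range(0, 13)),
--     *(-hours * 60 - 30 for hours in range(1, 13)),
--     *(hours * 60 + 45 for hours in (5, 8, 12)),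
-- }
--
-- def clamp_utc_offset_minutes(value: int) -> int:
--     value = max(MIN_UTC_OFFSET_MINUTES, min(MAX_UTC_OFFSET_MINUTES, int(value)))
--     if value in SUPPORTED_UTC_OFFSET_MINUTES:
--         return value
--     closest = None
--     closest_diff = None
--     for candidate in SUPPORTED_UTC_OFFSET_MINUTES:
--         diff = abs(candidate - value)
--         if closest is None or diff < closest_diff:  # type: ignore[operator]
--             closest = candidate
--             closest_diff = diff
--             continue
--         if diff == closest_diff and closest is not None:
--             if abs(candidate) < abs(closest):
--                 closest = candidate
--             elif abs(candidate) == abs(closest) and candidate > closest: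
--                 closest = candidate
--     return int(closest or 0)
-- ===== SOURCE B (Python) =====
-- import bisect
--
-- MIN_UTC_OFFSET_MINUTES = -12 * 60
--
-- MAX_UTC_OFFSET_MINUTES = 14 * 60
--
-- SUPPORTED_UTC_OFFSET_MINUTES = {
--     *(hours * 60 for hours in range(0, 15)),
--     *(hours * 60 + 30 for hours in range(1, 15)),
--     *(-hours * 60 for hours in range(0, 13)),
--     *(-hours * 60 - 30 for hours in range(1, 13)),
--     *(hours * 60 + 45 for hours in (5, 8, 12)),
-- }
--
-- SORTED_OFFSETS = sorted(SUPPORTED_UTC_OFFSET_MINUTES)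
--
-- def clamp_utc_offset_minutes(value: int) -> int:
--     value = max(MIN_UTC_OFFSET_MINUTES, min(MAX_UTC_OFFSET_MINUTES, int(value)))
--     i = bisect.bisect_left(SORTED_OFFSETS, value)
--     if i == 0:
--         return SORTED_OFFSETS[0]
--     if i == len(SORTED_OFFSETS):
--         return SORTED_OFFSETS[-1]
--     lo = SORTED_OFFSETS[i - 1]
--     hi = SORTED_OFFSETS[i]
--     if hi - value < value - lo:
--         return hi
--     if value - lo < hi - value:
--         return lo
--     # equal distance: smaller absolute value wins; on equal abs, the larger one
--     if abs(lo) < abs(hi):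
--         return lo
--     if abs(hi) < abs(lo):
--         return hi
--     return max(lo, hi)
-- ===== Notes on version B (the rewrite author's own statement) =====
-- stated objective: alternative
-- what changed: A scans the whole unordered offset set keeping a running closest candidate with tie-breaking; B binary-searches (bisect_left) a sorted index of the offsets built once at module level and decides between just the two neighbouring offsets with the same tie rule (min distance, then min abs, then larger).
import Mathlib
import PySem

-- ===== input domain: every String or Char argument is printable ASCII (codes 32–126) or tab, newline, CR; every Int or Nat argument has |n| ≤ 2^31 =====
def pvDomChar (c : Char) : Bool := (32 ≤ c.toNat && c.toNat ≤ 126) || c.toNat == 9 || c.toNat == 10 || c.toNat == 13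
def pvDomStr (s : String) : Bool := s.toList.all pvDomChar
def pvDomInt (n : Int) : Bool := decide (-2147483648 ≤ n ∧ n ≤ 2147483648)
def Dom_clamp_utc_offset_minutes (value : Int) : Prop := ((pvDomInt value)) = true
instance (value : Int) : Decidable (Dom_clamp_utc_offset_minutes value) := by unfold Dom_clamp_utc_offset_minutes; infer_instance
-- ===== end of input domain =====

-- B replaces A's linear scan with tie-breaking over the whole unordered set by a binary search
-- (bisect_left) over a sorted index, deciding between the two neighbouring offsets only (objective: faster scan mechanism).

-- ===== PORT A =====
-- module constants of Source A
def pvMIN_UTC_OFFSET_MINUTES : Int := -12 * 60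
def pvMAX_UTC_OFFSET_MINUTES : Int := 14 * 60
-- the set literal {*(...), ...}, inserted in source order (PySem.Set keeps first occurrences).
def pvSUPPORTED_UTC_OFFSET_MINUTES : PySem.Set Int :=
  PySem.Set.ofList (
    (PySem.List.pyRange 0 15 1).map (fun hours => hours * 60) ++
    (PySem.List.pyRange 1 15 1).map (fun hours => hours * 60 + 30) ++
    (PySem.List.pyRange 0 13 1).map (fun hours => -hours * 60) ++
    (PySem.List.pyRange 1 13 1).map (fun hours => -hours * 60 - 30) ++
    ([5, 8, 12] : List Int).map (fun hours => hours * 60 + 45))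

-- A's `for candidate in SUPPORTED...` iterates a Python set; its result is iteration-order
-- independent (it is the argmin of the injective key (diff, |c|, -c)), so folding the Set's
-- element list is exact.
def clamp_utc_offset_minutes (value : Int) : Int :=
  let value := max pvMIN_UTC_OFFSET_MINUTES (min pvMAX_UTC_OFFSET_MINUTES value)
  if PySem.Set.contains pvSUPPORTED_UTC_OFFSET_MINUTES value then value
  else
    let st := pvSUPPORTED_UTC_OFFSET_MINUTES.foldl
      (fun (st : Option Int × Option Int) candidate =>
        let closest := st.1
        let closest_diff := st.2
        let diff := |candidate - value|
        if closest.isNone || decide (diff < closest_diff.getD 0) then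
          (some candidate, some diff)
        else if decide (diff = closest_diff.getD 0) && !closest.isNone then
          let c := closest.getD 0
          if |candidate| < |c| then (some candidate, closest_diff)
          else if |candidate| = |c| ∧ candidate > c then (some candidate, closest_diff)
          else (closest, closest_diff)
        else (closest, closest_diff))
      (none, none)
    -- int(closest or 0): 0 when closest is None or 0
    match st.1 with
    | none => 0
    | some c => if c = 0 then 0 else c

-- ===== PORT B =====
def pvSORTED_OFFSETS : List Int :=
  PySem.List.sorted pvSUPPORTED_UTC_OFFSET_MINUTES (fun x => x) false

def clamp_utc_offset_minutes_alt (value : Int) : Int :=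
  let value := max pvMIN_UTC_OFFSET_MINUTES (min pvMAX_UTC_OFFSET_MINUTES value)
  let i := PySem.List.bisectLeft pvSORTED_OFFSETS value
  if i = 0 then pvSORTED_OFFSETS.getD 0 0
  else if i = pvSORTED_OFFSETS.length then
    (PySem.List.pyGet? pvSORTED_OFFSETS (-1)).getD 0
  else
    let lo := pvSORTED_OFFSETS.getD (i - 1) 0
    let hi := pvSORTED_OFFSETS.getD i 0
    if hi - value < value - lo then hi
    else if value - lo < hi - value then lo
    else if |lo| < |hi| then lo
    else if |hi| < |lo| then hi
    else max lo hi

-- ===== PRECONDITION & SPEC =====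
def Spec_clamp_utc_offset_minutes (value : Int) (out : Int) : Prop := out = clamp_utc_offset_minutes_alt value
instance (value : Int) (out : Int) : Decidable (Spec_clamp_utc_offset_minutes value out) := by unfold Spec_clamp_utc_offset_minutes; infer_instance

-- ===== CLAIM (what is proved, stated in full; the proofs are below) =====
def Claim_equal_clamp_utc_offset_minutes : Prop := ∀ (value : Int), Dom_clamp_utc_offset_minutes value → Spec_clamp_utc_offset_minutes value (clamp_utc_offset_minutes value)

-- ===== LEMMAS AND PROOFS =====

-- The module-level set and sorted index, evaluated once to literal lists (so the range check
-- below does not re-evaluate the set construction for every value).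
set_option maxRecDepth 100000 in
theorem pvSUPPORTED_eq : pvSUPPORTED_UTC_OFFSET_MINUTES = [0, 60, 120, 180, 240, 300, 360, 420, 480, 540, 600, 660, 720, 780, 840, 90, 150, 210, 270, 330, 390, 450, 510, 570, 630, 690, 750, 810, 870, -60, -120, -180, -240, -300, -360, -420, -480, -540, -600, -660, -720, -90, -150, -210, -270, -330, -390, -450, -510, -570, -630, -690, -750, 345, 525, 765] := by decide

set_option maxRecDepth 100000 in
theorem pvSORTED_eq : pvSORTED_OFFSETS = [-750, -720, -690, -660, -630, -600, -570, -540, -510, -480, -450, -420, -390, -360, -330, -300, -270, -240, -210, -180, -150, -120, -90, -60, 0, 60, 90, 120, 150, 180, 210, 240, 270, 300, 330, 345, 360, 390, 420, 450, 480, 510, 525, 540, 570, 600, 630, 660, 690, 720, 750, 765, 780, 810, 840, 870] := by decide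

-- Both ports first clamp to [-720, 840] and then depend only on the clamped value.
set_option maxRecDepth 10000 in
theorem pvA_clamp (value : Int) :
    clamp_utc_offset_minutes value = clamp_utc_offset_minutes (max (-720) (min 840 value)) := by
  have h : max pvMIN_UTC_OFFSET_MINUTES (min pvMAX_UTC_OFFSET_MINUTES (max (-720) (min 840 value)))
      = max pvMIN_UTC_OFFSET_MINUTES (min pvMAX_UTC_OFFSET_MINUTES value) := by
    simp only [pvMIN_UTC_OFFSET_MINUTES, pvMAX_UTC_OFFSET_MINUTES]; omega
  unfold clamp_utc_offset_minutes
  rw [h]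

set_option maxRecDepth 10000 in
theorem pvB_clamp (value : Int) :
    clamp_utc_offset_minutes_alt value = clamp_utc_offset_minutes_alt (max (-720) (min 840 value)) := by
  have h : max pvMIN_UTC_OFFSET_MINUTES (min pvMAX_UTC_OFFSET_MINUTES (max (-720) (min 840 value)))
      = max pvMIN_UTC_OFFSET_MINUTES (min pvMAX_UTC_OFFSET_MINUTES value) := by
    simp only [pvMIN_UTC_OFFSET_MINUTES, pvMAX_UTC_OFFSET_MINUTES]; omega
  unfold clamp_utc_offset_minutes_alt
  rw [h]

-- Exhaustive agreement on the clamped range [-720, 840].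
set_option maxRecDepth 1000000 in
set_option maxHeartbeats 16000000 in
theorem pvKey : ∀ v ∈ PySem.List.pyRange (-720) 841 1,
    clamp_utc_offset_minutes v = clamp_utc_offset_minutes_alt v := by
  simp only [clamp_utc_offset_minutes, clamp_utc_offset_minutes_alt, pvSUPPORTED_eq, pvSORTED_eq]
  decide

-- ===== VERDICT (by name: the statement is the Claim_ definition above) =====
theorem clamp_utc_offset_minutes_spec : Claim_equal_clamp_utc_offset_minutes := by
  intro value _
  unfold Spec_clamp_utc_offset_minutes
  rw [pvA_clamp, pvB_clamp]
  exact pvKey _ (PySem.List.mem_pyRange_one.mpr (by omega))
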